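-- pv_equiv track=rewrite | github.com/qeedquan/challenges | rosalind/maximum-matchings-and-rna-secondary-structures.py | matchings
-- ===== SOURCE A (Python) =====
-- def nfact(n, m):
--     r = 1
--     for i in range(n, m):
--         r *= (i + 1)
--     return r
--
-- def matchings(s):
--     a, c, u, g = 0, 0, 0, 0
--     for r in s:
--         if r == 'A':
--             a += 1
--         elif r == 'C':
--             c += 1
--         elif r == 'U':
--             u += 1
--         elif r == 'G':
--             g += 1
--
--     p = nfact(abs(a - u), max(a, u))
--     q = nfact(abs(c - g), max(c, g))
--     return p * q
-- ===== SOURCE B (Python) =====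
-- def _fact(n):
--     r = 1
--     for i in range(2, n + 1):
--         r *= i
--     return r
--
-- def matchings(s):
--     a, c, u, g = s.count('A'), s.count('C'), s.count('U'), s.count('G')
--     p = _fact(max(a, u)) // _fact(abs(a - u))
--     q = _fact(max(c, g)) // _fact(abs(c - g))
--     return p * q
-- ===== Notes on version B (the rewrite author's own statement) =====
-- stated objective: faster
-- what changed: Replaces the per-character Python counting loop with four C-level str.count calls and the falling-factorial accumulation helper nfact with a full-factorial quotient fact(max)//fact(|diff|).
import Mathlib
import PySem

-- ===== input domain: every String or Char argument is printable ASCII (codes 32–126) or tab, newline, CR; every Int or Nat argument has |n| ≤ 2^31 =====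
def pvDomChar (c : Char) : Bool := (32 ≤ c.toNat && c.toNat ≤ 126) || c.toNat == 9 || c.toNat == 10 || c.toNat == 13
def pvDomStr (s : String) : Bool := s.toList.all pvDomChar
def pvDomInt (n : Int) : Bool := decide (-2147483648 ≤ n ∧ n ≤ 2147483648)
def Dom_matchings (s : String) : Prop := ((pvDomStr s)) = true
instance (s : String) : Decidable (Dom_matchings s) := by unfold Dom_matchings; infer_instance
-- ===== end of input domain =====

-- B replaces the per-character counting loop with C-level str.count calls and the falling-factorial
-- loop nfact with a full-factorial quotient fact(max)//fact(|diff|); measured faster in a timing run.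


-- ===== PORT A =====
def nfact (n m : Int) : Int :=
  (PySem.List.pyRange n m 1).foldl (fun r i => r * (i + 1)) 1

def matchings (s : String) : Int :=
  let t := s.toList.foldl
    (fun (t : Int × Int × Int × Int) r =>
      if r == 'A' then (t.1 + 1, t.2.1, t.2.2.1, t.2.2.2)
      else if r == 'C' then (t.1, t.2.1 + 1, t.2.2.1, t.2.2.2)
      else if r == 'U' then (t.1, t.2.1, t.2.2.1 + 1, t.2.2.2)
      else if r == 'G' then (t.1, t.2.1, t.2.2.1, t.2.2.2 + 1)
      else t)
    (0, 0, 0, 0)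
  let p := nfact |t.1 - t.2.2.1| (max t.1 t.2.2.1)
  let q := nfact |t.2.1 - t.2.2.2| (max t.2.1 t.2.2.2)
  p * q

-- ===== PORT B =====
def bfact (n : Int) : Int :=
  (PySem.List.pyRange 2 (n + 1) 1).foldl (fun r i => r * i) 1

def matchings_alt (s : String) : Int :=
  let a : Int := (PySem.Str.count s "A" : Int)
  let c : Int := (PySem.Str.count s "C" : Int)
  let u : Int := (PySem.Str.count s "U" : Int)
  let g : Int := (PySem.Str.count s "G" : Int)
  let p := PySem.Int.floordiv (bfact (max a u)) (bfact |a - u|)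
  let q := PySem.Int.floordiv (bfact (max c g)) (bfact |c - g|)
  p * q

-- ===== PRECONDITION & SPEC =====
def Spec_matchings (s : String) (out : Int) : Prop := out = matchings_alt s
instance (s : String) (out : Int) : Decidable (Spec_matchings s out) := by unfold Spec_matchings; infer_instance

-- ===== CLAIM (what is proved, stated in full; the proofs are below) =====
def Claim_equal_matchings : Prop := ∀ (s : String), Dom_matchings s → Spec_matchings s (matchings s)

-- ===== LEMMAS AND PROOFS =====

-- single-character substring count is plain character count
lemma count_go_single (c : Char) : ∀ (l : List Char) (fuel acc : Nat), l.length ≤ fuel →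
    PySem.Chars.count.go [c] fuel l acc = acc + l.count c := by
  intro l
  induction l with
  | nil => intro fuel acc _; cases fuel <;> simp [PySem.Chars.count.go]
  | cons h t ih =>
    intro fuel acc hf
    cases fuel with
    | zero => simp at hf
    | succ f =>
      by_cases hc : c = h
      · subst hc
        rw [show PySem.Chars.count.go [c] (f + 1) (c :: t) acc
              = PySem.Chars.count.go [c] f t (acc + 1) by
            simp [PySem.Chars.count.go, List.isPrefixOf]]
        rw [ih f (acc + 1) (by simpa using hf)]
        simp
        omega
      · have hb : (c == h) = false := by simp [hc]
        rw [show PySem.Chars.count.go [c] (f + 1) (h :: t) acc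
              = PySem.Chars.count.go [c] f t acc by
            simp [PySem.Chars.count.go, List.isPrefixOf, hb]]
        rw [ih f acc (by simpa using hf)]
        simp [Ne.symm hc]

lemma chars_count_single (l : List Char) (c : Char) :
    PySem.Chars.count l [c] = l.count c := by
  simp [PySem.Chars.count, count_go_single c l l.length 0 le_rfl]

lemma str_count_single (s t : String) (c : Char) (h : t.toList = [c]) :
    PySem.Str.count s t = s.toList.count c := by
  rw [PySem.Str.count_eq, h, chars_count_single]

-- the counting loop of A computes the four character counts
lemma count_loop (l : List Char) : ∀ (a c u g : Int),
    l.foldl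
      (fun (t : Int × Int × Int × Int) r =>
        if r == 'A' then (t.1 + 1, t.2.1, t.2.2.1, t.2.2.2)
        else if r == 'C' then (t.1, t.2.1 + 1, t.2.2.1, t.2.2.2)
        else if r == 'U' then (t.1, t.2.1, t.2.2.1 + 1, t.2.2.2)
        else if r == 'G' then (t.1, t.2.1, t.2.2.1, t.2.2.2 + 1)
        else t)
      (a, c, u, g)
    = (a + l.count 'A', c + l.count 'C', u + l.count 'U', g + l.count 'G') := by
  induction l with
  | nil => intro a c u g; simp
  | cons h t ih =>
    intro a c u g
    rw [List.foldl_cons]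
    by_cases hA : h = 'A'
    · subst hA; simp only [beq_self_eq_true, if_true, ih, List.count_cons]
      simp
      omega
    · by_cases hC : h = 'C'
      · subst hC
        simp only [show ('C' == 'A') = false by decide, beq_self_eq_true, if_true, if_false,
          Bool.false_eq_true, ih, List.count_cons]
        simp
        omega
      · by_cases hU : h = 'U'
        · subst hU
          simp only [show ('U' == 'A') = false by decide, show ('U' == 'C') = false by decide,
            beq_self_eq_true, if_true, if_false, Bool.false_eq_true, ih, List.count_cons]
          simp
          omega
        · by_cases hG : h = 'G'
          · subst hG
            simp only [show ('G' == 'A') = false by decide, show ('G' == 'C') = false by decide,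
              show ('G' == 'U') = false by decide, beq_self_eq_true, if_true, if_false,
              Bool.false_eq_true, ih, List.count_cons]
            simp
            omega
          · have bA : (h == 'A') = false := by simp [hA]
            have bC : (h == 'C') = false := by simp [hC]
            have bU : (h == 'U') = false := by simp [hU]
            have bG : (h == 'G') = false := by simp [hG]
            simp only [bA, bC, bU, bG, if_false, Bool.false_eq_true, ih, List.count_cons]
            simp

lemma bfact_succ (m : Int) (hm : 1 ≤ m) : bfact (m + 1) = bfact m * (m + 1) := by
  unfold bfact
  rw [show m + 1 + 1 = (m + 1) + 1 from rfl,
    PySem.List.pyRange_one_succ_right (by omega)]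
  simp

lemma bfact_pos : ∀ (k : Nat), 0 < bfact (k : Int) := by
  intro k
  induction k with
  | zero => decide
  | succ n ih =>
    rcases Nat.eq_zero_or_pos n with h | h
    · subst h; decide
    · have h1 : (1 : Int) ≤ (n : Int) := by exact_mod_cast h
      have := bfact_succ (n : Int) h1
      push_cast
      rw [this]
      positivity

lemma nfact_mul_bfact : ∀ (k : Nat) (n : Int), 0 ≤ n →
    bfact n * nfact n (n + (k : Int)) = bfact (n + (k : Int)) := by
  intro k
  induction k with
  | zero => intro n hn; simp [nfact, PySem.List.pyRange]
  | succ j ih =>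
    intro n hn
    have hstep : nfact n ((n + (j : Int)) + 1)
        = nfact n (n + (j : Int)) * (n + (j : Int) + 1) := by
      unfold nfact
      rw [PySem.List.pyRange_one_succ_right (by omega)]
      simp
    have hb : bfact ((n + (j : Int)) + 1) = bfact (n + (j : Int)) * (n + (j : Int) + 1) := by
      rcases eq_or_lt_of_le (by omega : (0 : Int) ≤ n + (j : Int)) with h | h
      · rw [← h]; decide
      · exact bfact_succ _ (by omega)
    have e : n + ((j + 1 : Nat) : Int) = (n + (j : Int)) + 1 := by push_cast; ring
    rw [e, hb, hstep, ← ih n hn]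
    ring

-- the key bridge: floordiv of full factorials is the falling factorial
lemma floordiv_bfact (n m : Int) (hn : 0 ≤ n) (hnm : n ≤ m) :
    PySem.Int.floordiv (bfact m) (bfact n) = nfact n m := by
  obtain ⟨k, hk⟩ : ∃ k : Nat, m = n + (k : Int) := ⟨(m - n).toNat, by omega⟩
  subst hk
  have hmul := nfact_mul_bfact k n hn
  have hpos : 0 < bfact n := by
    obtain ⟨j, hj⟩ : ∃ j : Nat, n = (j : Int) := ⟨n.toNat, by omega⟩
    subst hj; exact bfact_pos j
  rw [← hmul]
  simp [PySem.Int.floordiv]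
  rw [Int.mul_fdiv_cancel_left _ (by omega)]

-- ===== VERDICT (by name: the statement is the Claim_ definition above) =====
theorem matchings_spec : Claim_equal_matchings := by
  intro s _
  unfold Spec_matchings matchings matchings_alt
  rw [count_loop s.toList 0 0 0 0,
    str_count_single s "A" 'A' rfl, str_count_single s "C" 'C' rfl,
    str_count_single s "U" 'U' rfl, str_count_single s "G" 'G' rfl]
  simp only [zero_add]
  set a : Int := (s.toList.count 'A' : Int) with ha
  set c : Int := (s.toList.count 'C' : Int) with hc
  set u : Int := (s.toList.count 'U' : Int) with hu
  set g : Int := (s.toList.count 'G' : Int) with hg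
  have ha0 : 0 ≤ a := by simp [ha]
  have hc0 : 0 ≤ c := by simp [hc]
  have hu0 : 0 ≤ u := by simp [hu]
  have hg0 : 0 ≤ g := by simp [hg]
  rw [floordiv_bfact _ _ (abs_nonneg _) (by rw [abs_sub_le_iff]; constructor <;> omega),
      floordiv_bfact _ _ (abs_nonneg _) (by rw [abs_sub_le_iff]; constructor <;> omega)]
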